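-- pv_equiv track=rewrite | github.com/AustinJunyuLi/bids_pipeline | skill_pipeline/gates.py | _hot_spots
-- ===== SOURCE A (Python) =====
-- from collections import Counter
--
-- WINDOW_SIZE = 5
--
-- HOT_SPOT_THRESHOLD = 3
--
-- def _hot_spots(failure_ordinals: list[int], total_blocks: int) -> list[dict]:
--     if not failure_ordinals:
--         return []
--
--     counts_by_ordinal = Counter(failure_ordinals)
--     hot_spots: list[dict] = []
--     if total_blocks <= 0:
--         return hot_spots
--
--     for start in range(1, total_blocks + 1):
--         end = min(total_blocks, start + WINDOW_SIZE - 1)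
--         failure_count = sum(
--             count
--             for ordinal, count in counts_by_ordinal.items()
--             if start <= ordinal <= end
--         )
--         if failure_count >= HOT_SPOT_THRESHOLD:
--             hot_spots.append(
--                 {
--                     "block_ordinal_start": start,
--                     "block_ordinal_end": end,
--                     "failure_count": failure_count,
--                 }
--             )
--     return hot_spots
-- ===== SOURCE B (Python) =====
-- from collections import Counter
--
-- WINDOW_SIZE = 5
--
-- HOT_SPOT_THRESHOLD = 3
--
-- def _hot_spots(failure_ordinals, total_blocks):
--     if not failure_ordinals or total_blocks <= 0:
--         return []
--
--     counts = Counter(failure_ordinals)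
--     # count of failures in the first window [1, min(total_blocks, WINDOW_SIZE)]
--     cur = sum(counts[o] for o in range(1, min(total_blocks, WINDOW_SIZE) + 1))
--     hot_spots = []
--     for start in range(1, total_blocks + 1):
--         end = min(total_blocks, start + WINDOW_SIZE - 1)
--         if cur >= HOT_SPOT_THRESHOLD:
--             hot_spots.append(
--                 {
--                     "block_ordinal_start": start,
--                     "block_ordinal_end": end,
--                     "failure_count": cur,
--                 }
--             )
--         # slide the window: drop `start`, add the ordinal entering on the right
--         cur -= counts[start]
--         if start + WINDOW_SIZE <= total_blocks:
--             cur += counts[start + WINDOW_SIZE]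
--     return hot_spots
-- ===== Notes on version B (the rewrite author's own statement) =====
-- stated objective: faster
-- what changed: Replaces the per-window rescan of all distinct ordinal counts by an incremental sliding window that adds the entering ordinal's count and subtracts the leaving one's.
import Mathlib
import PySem

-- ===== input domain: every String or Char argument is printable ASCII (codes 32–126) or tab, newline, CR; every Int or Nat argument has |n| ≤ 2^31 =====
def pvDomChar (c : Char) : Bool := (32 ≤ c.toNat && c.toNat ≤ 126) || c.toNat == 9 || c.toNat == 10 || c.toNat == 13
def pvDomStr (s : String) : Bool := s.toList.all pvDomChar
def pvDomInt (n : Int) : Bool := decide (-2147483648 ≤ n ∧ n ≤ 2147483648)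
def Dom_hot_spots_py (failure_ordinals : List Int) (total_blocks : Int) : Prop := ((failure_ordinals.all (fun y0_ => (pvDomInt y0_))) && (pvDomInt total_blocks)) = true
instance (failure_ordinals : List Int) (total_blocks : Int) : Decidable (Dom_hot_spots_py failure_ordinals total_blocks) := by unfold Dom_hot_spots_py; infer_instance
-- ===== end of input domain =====

-- B slides the window incrementally (add the entering ordinal's count, subtract the leaving one's)
-- instead of A's rescan of every distinct ordinal per window; objective: faster (asymptotic).

-- ===== PORT A =====
def hot_spots_py (failure_ordinals : List Int) (total_blocks : Int) : List (List (String × Int)) :=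
  if failure_ordinals = [] then []
  else
    let counts_by_ordinal := PySem.Dict.counter failure_ordinals
    let hot_spots : List (List (String × Int)) := []
    if total_blocks ≤ 0 then hot_spots
    else
      (PySem.List.pyRange 1 (total_blocks + 1) 1).foldl (fun hs start =>
        let e := min total_blocks (start + 5 - 1)
        let failure_count := counts_by_ordinal.items.foldl
          (fun acc p => if start ≤ p.1 ∧ p.1 ≤ e then acc + p.2 else acc) 0
        if failure_count ≥ 3 then
          hs ++ [[("block_ordinal_start", start), ("block_ordinal_end", e),
                  ("failure_count", failure_count)]]
        else hs) hot_spots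

-- ===== PORT B =====
def hot_spots_py_alt (failure_ordinals : List Int) (total_blocks : Int) : List (List (String × Int)) :=
  if failure_ordinals = [] ∨ total_blocks ≤ 0 then []
  else
    let counts := PySem.Dict.counter failure_ordinals
    let cur0 : Int := (PySem.List.pyRange 1 (min total_blocks 5 + 1) 1).foldl
      (fun acc o => acc + counts.getD o 0) 0
    let res := (PySem.List.pyRange 1 (total_blocks + 1) 1).foldl
      (fun (st : List (List (String × Int)) × Int) start =>
        let e := min total_blocks (start + 5 - 1)
        let hs := if st.2 ≥ 3 then
            st.1 ++ [[("block_ordinal_start", start), ("block_ordinal_end", e),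
                      ("failure_count", st.2)]]
          else st.1
        let cur := st.2 - counts.getD start 0
        let cur := if start + 5 ≤ total_blocks then cur + counts.getD (start + 5) 0 else cur
        (hs, cur)) ([], cur0)
    res.1

-- ===== PRECONDITION & SPEC =====
def Spec_hot_spots_py (failure_ordinals : List Int) (total_blocks : Int) (out : List (List (String × Int))) : Prop := out = hot_spots_py_alt failure_ordinals total_blocks
instance (failure_ordinals : List Int) (total_blocks : Int) (out : List (List (String × Int))) : Decidable (Spec_hot_spots_py failure_ordinals total_blocks out) := by unfold Spec_hot_spots_py; infer_instance

-- ===== CLAIM (what is proved, stated in full; the proofs are below) =====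
def Claim_equal_hot_spots_py : Prop := ∀ (failure_ordinals : List Int) (total_blocks : Int), Dom_hot_spots_py failure_ordinals total_blocks → Spec_hot_spots_py failure_ordinals total_blocks (hot_spots_py failure_ordinals total_blocks)

-- ===== LEMMAS AND PROOFS =====

-- number of failures in the ordinal window [s, e]
def pvW (xs : List Int) (s e : Int) : Int :=
  (xs.countP (fun x => decide (s ≤ x ∧ x ≤ e)) : Int)

theorem pvW_left (xs : List Int) (s e : Int) (h : s ≤ e) :
    pvW xs s e = (xs.count s : Int) + pvW xs (s + 1) e := by
  unfold pvW
  induction xs with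
  | nil => simp
  | cons x xs ih =>
    simp only [List.countP_cons, List.count_cons, decide_eq_true_eq, beq_iff_eq]
    push_cast
    rw [ih]
    split_ifs <;> omega

theorem pvW_right (xs : List Int) (s e : Int) (h : s ≤ e) :
    pvW xs s e = pvW xs s (e - 1) + (xs.count e : Int) := by
  unfold pvW
  induction xs with
  | nil => simp
  | cons x xs ih =>
    simp only [List.countP_cons, List.count_cons, decide_eq_true_eq, beq_iff_eq]
    push_cast
    rw [ih]
    split_ifs <;> omega

theorem pvW_empty (xs : List Int) (s e : Int) (h : e < s) : pvW xs s e = 0 := by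
  unfold pvW
  have h0 : xs.countP (fun x => decide (s ≤ x ∧ x ≤ e)) = 0 :=
    List.countP_eq_zero.mpr (fun a _ => by simp only [decide_eq_true_eq, not_and, not_le]; omega)
  rw [h0]
  rfl

-- countP splits off one key
theorem pvCountP_split (p : Int → Bool) (k : Int) (xs : List Int) :
    (xs.countP p : Int)
      = (if p k = true then (xs.count k : Int) else 0)
        + (xs.countP (fun x => p x && !(x == k)) : Int) := by
  induction xs with
  | nil => simp
  | cons y ys ihy =>
    simp only [List.countP_cons, List.count_cons, beq_iff_eq]
    push_cast
    rw [ihy]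
    by_cases h2 : y = k
    · subst h2
      by_cases h1 : p y = true <;> simp [h1] <;> ring
    · have hqy : (p y && !(y == k)) = p y := by simp [h2]
      rw [hqy, if_neg h2]
      by_cases h1 : p y = true <;> simp [h1] <;> ring

-- A's per-window generator sum over the distinct keys equals the window count
theorem pvSum_keys (xs : List Int) (s e : Int) :
    ∀ (ks : List Int), ks.Nodup → (∀ x ∈ xs, (s ≤ x ∧ x ≤ e) → x ∈ ks) →
      (ks.foldl (fun acc k => if s ≤ k ∧ k ≤ e then acc + (xs.count k : Int) else acc) 0)
        = pvW xs s e := by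
  -- generalize the interval predicate so already-handled keys can be excluded
  suffices H : ∀ (p : Int → Bool) (ks : List Int), ks.Nodup →
      (∀ x ∈ xs, p x = true → x ∈ ks) →
      (ks.foldl (fun acc k => if p k = true then acc + (xs.count k : Int) else acc) 0)
        = (xs.countP p : Int) by
    intro ks hnd hcov
    have := H (fun x => decide (s ≤ x ∧ x ≤ e)) ks hnd (by
      intro x hx hpx
      exact hcov x hx (by simpa using hpx))
    simp only [decide_eq_true_eq] at this
    simpa [pvW] using this
  intro p ks
  induction ks generalizing p with
  | nil =>
    intro _ hcov
    have h0 : xs.countP p = 0 :=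
      List.countP_eq_zero.mpr (fun a ha hpa => by exact absurd (hcov a ha hpa) (by simp))
    simp [h0]
  | cons k ks ih =>
    intro hnd hcov
    have hknot : k ∉ ks := (List.nodup_cons.mp hnd).1
    have hnd' : ks.Nodup := (List.nodup_cons.mp hnd).2
    -- move the init through the fold
    have fold_shift : ∀ (q : Int → Bool) (l : List Int) (init : Int),
        l.foldl (fun acc k => if q k = true then acc + (xs.count k : Int) else acc) init
          = init + l.foldl (fun acc k => if q k = true then acc + (xs.count k : Int) else acc) 0 := by
      intro q l
      induction l with
      | nil => simp
      | cons a l ihl =>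
        intro init
        simp only [List.foldl_cons]
        rw [ihl, ihl (if q a = true then 0 + (xs.count a : Int) else 0)]
        split_ifs <;> ring
    have hcov' : ∀ x ∈ xs, (fun x => p x && !(x == k)) x = true → x ∈ ks := by
      intro x hx hqx
      simp only [Bool.and_eq_true, Bool.not_eq_true', beq_eq_false_iff_ne] at hqx
      rcases List.mem_cons.mp (hcov x hx hqx.1) with h | h
      · exact absurd h hqx.2
      · exact h
    have ihq := ih (fun x => p x && !(x == k)) hnd' hcov'
    -- on ks, p and the restricted predicate agree
    have agree : ks.foldl (fun acc k' => if p k' = true then acc + (xs.count k' : Int) else acc) 0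
        = ks.foldl (fun acc k' => if (p k' && !(k' == k)) = true then acc + (xs.count k' : Int) else acc) 0 := by
      apply PySem.List.foldl_congr_mem
      intro acc a ha
      have hak : a ≠ k := fun hh => hknot (hh ▸ ha)
      simp [hak]
    have split := pvCountP_split p k xs
    simp only [List.foldl_cons]
    rw [fold_shift, agree, ihq, split]
    split_ifs <;> simp

-- items-of-counter fold equals the window count
theorem pvItems_sum (xs : List Int) (s e : Int) :
    ((PySem.Dict.counter xs).items.foldl
      (fun acc (p : Int × Int) => if s ≤ p.1 ∧ p.1 ≤ e then acc + p.2 else acc) 0)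
      = pvW xs s e := by
  rw [PySem.Dict.items_counter]
  rw [List.foldl_map]
  exact pvSum_keys xs s e (PySem.Set.ofList xs) (PySem.Set.nodup_ofList xs)
    (fun x hx _ => (PySem.Set.mem_ofList xs x).mpr hx)

-- the initial-window sum of counts equals the window count
theorem pvInit_sum (xs : List Int) : ∀ (n : ℕ) (a b : Int), b + 1 - a = (n : Int) →
    ((PySem.List.pyRange a (b + 1) 1).foldl
      (fun acc o => acc + ((PySem.Dict.counter xs).getD o 0)) 0)
      = pvW xs a b := by
  intro n
  induction n with
  | zero =>
    intro a b hn
    rw [PySem.List.pyRange_one_eq_nil (by omega)]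
    rw [pvW_empty xs a b (by omega)]
    rfl
  | succ m ihm =>
    intro a b hn
    have hab : a ≤ b := by omega
    rw [PySem.List.pyRange_one_succ_right (by omega)]
    rw [List.foldl_append]
    have hb : b - 1 + 1 = b := by omega
    have hpre := ihm a (b - 1) (by omega)
    rw [hb] at hpre
    rw [hpre]
    simp only [List.foldl_cons, List.foldl_nil]
    rw [PySem.Dict.getD_counter]
    rw [pvW_right xs a b hab]

-- sliding-window update: dropping `s` and adding `s+5` (when it exists) moves the window
theorem pvSlide (xs : List Int) (tb s : Int) (h1 : 1 ≤ s) (h2 : s ≤ tb) :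
    (if s + 5 ≤ tb then
        pvW xs s (min tb (s + 5 - 1)) - ((PySem.Dict.counter xs).getD s 0)
          + ((PySem.Dict.counter xs).getD (s + 5) 0)
      else pvW xs s (min tb (s + 5 - 1)) - ((PySem.Dict.counter xs).getD s 0))
      = pvW xs (s + 1) (min tb (s + 1 + 5 - 1)) := by
  rw [PySem.Dict.getD_counter, PySem.Dict.getD_counter]
  by_cases hc : s + 5 ≤ tb
  · have e1 : min tb (s + 5 - 1) = s + 4 := by omega
    have e2 : min tb (s + 1 + 5 - 1) = s + 5 := by omega
    rw [if_pos hc, e1, e2]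
    rw [pvW_left xs s (s + 4) (by omega)]
    rw [pvW_right xs (s + 1) (s + 5) (by omega)]
    have h45 : s + 5 - 1 = s + 4 := by omega
    rw [h45]
    ring
  · have e2 : min tb (s + 1 + 5 - 1) = min tb (s + 5 - 1) := by omega
    rw [if_neg hc, e2]
    by_cases hlt : s ≤ min tb (s + 5 - 1)
    · rw [pvW_left xs s (min tb (s + 5 - 1)) hlt]
      by_cases hlt2 : s + 1 ≤ min tb (s + 5 - 1)
      · ring
      · rw [pvW_empty xs (s + 1) (min tb (s + 5 - 1)) (by omega)]
        ring
    · omega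

-- main loop correspondence: A's rescanning fold equals B's sliding fold
theorem pvLoop (xs : List Int) (tb : Int) :
    ∀ (n : ℕ) (s : Int), 1 ≤ s → tb + 1 - s = (n : Int) →
    ∀ (hs : List (List (String × Int))) (cur : Int),
      cur = pvW xs s (min tb (s + 5 - 1)) →
      ((PySem.List.pyRange s (tb + 1) 1).foldl (fun hs' start =>
        if ((PySem.Dict.counter xs).items.foldl
            (fun acc p => if start ≤ p.1 ∧ p.1 ≤ min tb (start + 5 - 1) then acc + p.2 else acc) 0) ≥ 3 then
          hs' ++ [[("block_ordinal_start", start), ("block_ordinal_end", min tb (start + 5 - 1)),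
                   ("failure_count",
                     (PySem.Dict.counter xs).items.foldl
                       (fun acc p => if start ≤ p.1 ∧ p.1 ≤ min tb (start + 5 - 1) then acc + p.2 else acc) 0)]]
        else hs') hs)
      = ((PySem.List.pyRange s (tb + 1) 1).foldl
          (fun (st : List (List (String × Int)) × Int) start =>
            (if st.2 ≥ 3 then
                st.1 ++ [[("block_ordinal_start", start), ("block_ordinal_end", min tb (start + 5 - 1)),
                          ("failure_count", st.2)]]
              else st.1,
             if start + 5 ≤ tb then
               st.2 - (PySem.Dict.counter xs).getD start 0 + (PySem.Dict.counter xs).getD (start + 5) 0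
             else st.2 - (PySem.Dict.counter xs).getD start 0)) (hs, cur)).1 := by
  intro n
  induction n with
  | zero =>
    intro s hs1 hn hs cur hcur
    rw [PySem.List.pyRange_one_eq_nil (by omega)]
    simp
  | succ m ihm =>
    intro s hs1 hn hs cur hcur
    have hstb : s ≤ tb := by omega
    rw [PySem.List.pyRange_one_cons (by omega)]
    simp only [List.foldl_cons]
    rw [pvItems_sum xs s (min tb (s + 5 - 1)), ← hcur]
    have hnext : (if s + 5 ≤ tb then
          cur - ((PySem.Dict.counter xs).getD s 0) + ((PySem.Dict.counter xs).getD (s + 5) 0)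
        else cur - ((PySem.Dict.counter xs).getD s 0))
        = pvW xs (s + 1) (min tb (s + 1 + 5 - 1)) := by
      rw [hcur]; exact pvSlide xs tb s hs1 hstb
    exact ihm (s + 1) (by omega) (by omega) _ _ hnext

-- ===== VERDICT (by name: the statement is the Claim_ definition above) =====
theorem hot_spots_py_spec : Claim_equal_hot_spots_py := by
  intro xs tb _
  unfold Spec_hot_spots_py hot_spots_py hot_spots_py_alt
  by_cases hnil : xs = []
  · simp [hnil]
  · by_cases htb : tb ≤ 0
    · simp [hnil, htb]
    · simp only [hnil, htb, if_false, or_self]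
      have hinit : ((PySem.List.pyRange 1 (min tb 5 + 1) 1).foldl
          (fun acc o => acc + ((PySem.Dict.counter xs).getD o 0)) 0)
          = pvW xs 1 (min tb (1 + 5 - 1)) := by
        rw [pvInit_sum xs (min tb 5).toNat 1 (min tb 5) (by omega)]
        norm_num
      exact pvLoop xs tb (tb.toNat) 1 le_rfl (by omega) [] _ hinit
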